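-- pv_equiv track=rewrite | github.com/ible-ai/adaptible | adaptible/_src/_llm.py | _detect_token_loop
-- ===== SOURCE A (Python) =====
-- from typing import AsyncIterable, List, Tuple, cast
--
-- def _detect_token_loop(
--     tokens: List[int], sequence_length: int, max_repetitions: int
-- ) -> bool:
--     """Detect if the most recent tokens form a repeating loop.
--
--     Args:
--         tokens: List of generated token IDs.
--         sequence_length: Length of sequence to check for repetition.
--         max_repetitions: Maximum number of times a sequence can repeat.
--
--     Returns:
--         True if a loop is detected, False otherwise.
--     """
--     if len(tokens) < sequence_length * max_repetitions:
--         return False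
--
--     # Get the most recent sequence
--     recent_sequence = tokens[-sequence_length:]
--
--     # Check if this sequence has repeated max_repetitions times
--     for i in range(1, max_repetitions):
--         start_idx = -(i + 1) * sequence_length
--         end_idx = -i * sequence_length if i > 0 else None
--         comparison_sequence = tokens[start_idx:end_idx]
--
--         if comparison_sequence != recent_sequence:
--             return False
--
--     return True
-- ===== SOURCE B (Python) =====
-- def _detect_token_loop(
--     tokens, sequence_length, max_repetitions
-- ):
--     """Detect a token loop by rebuilding the expected repeated tail once
--     and comparing it to the actual tail, instead of checking block by block."""
--     if len(tokens) < sequence_length * max_repetitions: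
--         return False
--     if max_repetitions <= 1:
--         # fewer than two required repetitions: trivially a "loop"
--         return True
--     recent = tokens[-sequence_length:]
--     tail = tokens[-(sequence_length * max_repetitions):]
--     return len(tail) == len(recent) * max_repetitions and tail == recent * max_repetitions
-- ===== Notes on version B (the rewrite author's own statement) =====
-- stated objective: simpler
-- what changed: Replaces A's per-block comparison loop over repetition indices with a single reconstruction: build recent * max_repetitions once and compare it to the tail slice.
import Mathlib
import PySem

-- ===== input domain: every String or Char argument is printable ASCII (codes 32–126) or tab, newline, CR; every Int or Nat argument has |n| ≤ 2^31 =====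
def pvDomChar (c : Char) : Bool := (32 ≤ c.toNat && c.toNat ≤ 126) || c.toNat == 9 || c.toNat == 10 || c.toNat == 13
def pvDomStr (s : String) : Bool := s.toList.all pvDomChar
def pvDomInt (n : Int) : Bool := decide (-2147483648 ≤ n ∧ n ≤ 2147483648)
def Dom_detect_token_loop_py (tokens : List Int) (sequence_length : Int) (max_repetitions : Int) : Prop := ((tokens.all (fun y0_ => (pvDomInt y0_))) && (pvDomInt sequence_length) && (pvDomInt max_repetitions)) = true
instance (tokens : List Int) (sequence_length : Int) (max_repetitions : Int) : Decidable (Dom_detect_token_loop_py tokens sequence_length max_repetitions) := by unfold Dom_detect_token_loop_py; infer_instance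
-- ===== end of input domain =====

-- B replaces A's per-block comparison loop with a single reconstruction of the expected
-- repeated tail (recent * max_repetitions) compared against the actual tail (objective: simpler).

-- ===== PORT A =====
-- the 'for i in range(1, max_repetitions)' loop with its early 'return False'
def pv_loopA (tokens : List Int) (sequence_length : Int) (recent_sequence : List Int)
    (i max_repetitions : Int) : Bool :=
  if _h : i < max_repetitions then
    if PySem.List.slice tokens (some (-(i + 1) * sequence_length))
        (if 0 < i then some (-i * sequence_length) else none) == recent_sequence then
      pv_loopA tokens sequence_length recent_sequence (i + 1) max_repetitions
    else false
  else true
termination_by (max_repetitions - i).toNat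
decreasing_by omega

def detect_token_loop_py (tokens : List Int) (sequence_length : Int) (max_repetitions : Int) : Bool :=
  if (tokens.length : Int) < sequence_length * max_repetitions then false
  else
    let recent_sequence := PySem.List.slice tokens (some (-sequence_length)) none
    pv_loopA tokens sequence_length recent_sequence 1 max_repetitions

-- ===== PORT B =====
def detect_token_loop_py_alt (tokens : List Int) (sequence_length : Int) (max_repetitions : Int) : Bool :=
  if (tokens.length : Int) < sequence_length * max_repetitions then false
  else if max_repetitions ≤ 1 then true
  else
    let recent := PySem.List.slice tokens (some (-sequence_length)) none
    let tail := PySem.List.slice tokens (some (-(sequence_length * max_repetitions))) none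
    -- Python's short-circuiting 'and' is ported as if-then-else
    if (tail.length : Int) == (recent.length : Int) * max_repetitions then
      tail == (List.replicate max_repetitions.toNat recent).flatten
    else false

-- ===== PRECONDITION & SPEC =====
def Spec_detect_token_loop_py (tokens : List Int) (sequence_length : Int) (max_repetitions : Int) (out : Bool) : Prop := out = detect_token_loop_py_alt tokens sequence_length max_repetitions
instance (tokens : List Int) (sequence_length : Int) (max_repetitions : Int) (out : Bool) : Decidable (Spec_detect_token_loop_py tokens sequence_length max_repetitions out) := by unfold Spec_detect_token_loop_py; infer_instance

-- ===== CLAIM (what is proved, stated in full; the proofs are below) =====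
def Claim_equal_detect_token_loop_py : Prop := ∀ (tokens : List Int) (sequence_length : Int) (max_repetitions : Int), Dom_detect_token_loop_py tokens sequence_length max_repetitions → Spec_detect_token_loop_py tokens sequence_length max_repetitions (detect_token_loop_py tokens sequence_length max_repetitions)

-- ===== LEMMAS AND PROOFS =====

theorem pv_loopA_eq_all (tokens : List Int) (s : Int) (recent : List Int) (i m : Int) :
    pv_loopA tokens s recent i m =
      ((PySem.List.pyRange i m 1).all fun x =>
        PySem.List.slice tokens (some (-(x + 1) * s))
          (if 0 < x then some (-x * s) else none) == recent) := by
  unfold pv_loopA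
  split
  · next h =>
    rw [PySem.List.pyRange_one_cons h, List.all_cons]
    cases hq : (PySem.List.slice tokens (some (-(i + 1) * s))
        (if 0 < i then some (-i * s) else none) == recent) with
    | true => rw [if_pos rfl, Bool.true_and, pv_loopA_eq_all]
    | false => simp
  · next h =>
    rw [PySem.List.pyRange_one_eq_nil (by omega)]
    simp
termination_by (m - i).toNat
decreasing_by omega

-- the heart of the equivalence for a positive sequence length, stated in Nat:
-- every block of sN tokens before the last equals the last block
-- iff the whole tail of k*sN tokens is k copies of the last block
theorem pv_chunks_iff (l r : List Int) (sN : Nat) (hs : 1 ≤ sN)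
    (hr : r = l.drop (l.length - sN)) (k : Nat) (hk : 1 ≤ k) (hkn : k * sN ≤ l.length) :
    ((∀ j : Nat, 1 ≤ j → j < k → (l.drop (l.length - (j+1)*sN)).take sN = r) ↔
      l.drop (l.length - k*sN) = (List.replicate k r).flatten) := by
  induction k with
  | zero => omega
  | succ k ih =>
    have hmul : (k+1) * sN = k * sN + sN := by ring
    rcases Nat.eq_or_lt_of_le hk with h1 | h1
    · have hk0 : k = 0 := by omega
      subst hk0
      constructor
      · intro _; simp [hr]
      · intro _ j hj1 hj2; exact ((by omega : False)).elim
    · have hk1 : 1 ≤ k := by omega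
      have hkn' : k * sN ≤ l.length := by omega
      have ih' := ih hk1 hkn'
      have hsplit : l.drop (l.length - (k+1)*sN) =
          (l.drop (l.length - (k+1)*sN)).take sN ++ l.drop (l.length - k*sN) := by
        conv_lhs => rw [← List.take_append_drop sN (l.drop (l.length - (k+1)*sN))]
        rw [List.drop_drop]
        rw [hmul]
        have hidx : l.length - (k * sN + sN) + sN = l.length - k * sN := by omega
        rw [hidx]
      have hlen1 : ((l.drop (l.length - (k+1)*sN)).take sN).length = sN := by
        rw [List.length_take, List.length_drop, hmul]
        omega
      have hlenr : r.length = sN := by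
        rw [hr, List.length_drop]; omega
      constructor
      · intro h
        rw [List.replicate_succ, List.flatten_cons, hsplit]
        rw [← ih'.mp (fun j hj1 hj2 => h j hj1 (by omega))]
        rw [h k hk1 (by omega)]
      · intro h j hj1 hj2
        rw [List.replicate_succ, List.flatten_cons, hsplit] at h
        have hinj := List.append_inj h (by omega)
        rcases Nat.lt_succ_iff_lt_or_eq.mp hj2 with hj | hj
        · exact (ih'.mpr hinj.2) j hj1 hj
        · subst hj; exact hinj.1

theorem pv_ite_and {P : Prop} [Decidable P] (b : Bool) :
    ((if P then b else false) = true) ↔ (P ∧ b = true) := by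
  split <;> simp [*]

theorem pv_len_of_eq (tail recent : List Int) (mN : Nat)
    (h : tail = (List.replicate mN recent).flatten) :
    (tail.length : Int) = (recent.length : Int) * (mN : Int) := by
  subst h
  simp only [List.length_flatten, List.map_replicate, List.sum_replicate, smul_eq_mul]
  push_cast
  ring

theorem pv_main (tokens : List Int) (s m : Int) :
    detect_token_loop_py tokens s m = detect_token_loop_py_alt tokens s m := by
  unfold detect_token_loop_py detect_token_loop_py_alt
  by_cases hg : (tokens.length : Int) < s * m
  · simp [hg]
  · rw [if_neg hg, if_neg hg]
    by_cases hm : m ≤ 1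
    · rw [if_pos hm]
      simp only [pv_loopA_eq_all, PySem.List.pyRange_one_eq_nil hm]
      simp
    · rw [if_neg hm]
      rw [not_le] at hm
      rw [not_lt] at hg
      rw [Bool.eq_iff_iff]
      simp only [pv_loopA_eq_all, List.all_eq_true, pv_ite_and, beq_iff_eq, PySem.List.mem_pyRange_one]
      by_cases hs : s ≤ 0
      · -- nonpositive sequence_length: every comparison slice is empty
        obtain ⟨t, ht⟩ : ∃ t : Nat, s = -(t : Int) := ⟨(-s).toNat, by omega⟩
        obtain ⟨mN, hmN⟩ : ∃ mN : Nat, m = (mN : Int) := ⟨m.toNat, by omega⟩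
        subst ht hmN
        have hmN2 : 2 ≤ mN := by exact_mod_cast hm
        have e1 : (-(-(t:Int)) : Int) = ((t : Nat) : Int) := neg_neg _
        have e2 : (-(-(t:Int) * (mN:Int)) : Int) = ((t * mN : Nat) : Int) := by push_cast; ring
        have hrec : PySem.List.slice tokens (some (-(-(t:Int)))) none = tokens.drop t := by
          rw [e1, PySem.List.slice_from_natCast]
        simp only [hrec, e2, PySem.List.slice_from_natCast, Int.toNat_natCast]
        rw [and_iff_right_of_imp (pv_len_of_eq _ _ _)]
        have hchunk : ∀ x : Int, 1 ≤ x → x < (mN : Int) →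
            PySem.List.slice tokens (some (-(x + 1) * -(t:Int))) (some (-x * -(t:Int))) = [] := by
          intro x hx1 hx2
          lift x to Nat using (by omega)
          have c1 : (-((x:Int) + 1) * -(t:Int) : Int) = (((x+1) * t : Nat) : Int) := by push_cast; ring
          have c2 : (-(x:Int) * -(t:Int) : Int) = ((x * t : Nat) : Int) := by push_cast; ring
          rw [c1, c2, PySem.List.slice_natCast]
          have : x * t - (x + 1) * t = 0 := by
            have : x * t ≤ (x + 1) * t := Nat.mul_le_mul_right t (by omega)
            omega
          simp [this]
        have hm1 : (1:Int) < (mN:Int) := by exact_mod_cast hmN2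
        constructor
        · intro h
          have h1 := h 1 ⟨le_refl 1, hm1⟩
          rw [if_pos (by norm_num : (0:Int) < 1), hchunk 1 le_rfl hm1] at h1
          have hnt : tokens.length ≤ t := by
            have := List.drop_eq_nil_iff.mp h1.symm
            omega
          have htm : tokens.length ≤ t * mN := by
            have : t ≤ t * mN := Nat.le_mul_of_pos_right t (by omega)
            omega
          rw [List.drop_eq_nil_iff.mpr (by omega), ← h1]
          simp
        · intro h x hx
          rw [if_pos (by omega : (0:Int) < x), hchunk x hx.1 hx.2]
          -- it remains to show recent = [], i.e. tokens.length ≤ t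
          by_contra hne
          have htn : ¬ tokens.length ≤ t := by
            intro hle
            exact hne ((List.drop_eq_nil_iff.mpr hle) ▸ rfl)
          have hlen := congrArg List.length h
          rw [List.length_drop] at hlen
          have hflat : ((List.replicate mN (tokens.drop t)).flatten).length
              = mN * (tokens.drop t).length := by
            simp [List.length_flatten, List.map_replicate, List.sum_replicate, smul_eq_mul]
          rw [hflat, List.length_drop] at hlen
          have f1 : mN * (tokens.length - t) + mN * t = mN * tokens.length := by
            rw [← Nat.mul_add]
            congr 1
            omega
          have f2 : t * mN = mN * t := Nat.mul_comm t mN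
          have f3 : 2 * tokens.length ≤ mN * tokens.length :=
            Nat.mul_le_mul_right tokens.length (by omega)
          have f4 : tokens.length - t ≤ mN * (tokens.length - t) :=
            Nat.le_mul_of_pos_left _ (by omega)
          omega
      · -- positive sequence_length: block-by-block comparison vs. reconstruction
        rw [not_le] at hs
        obtain ⟨sN, hsN⟩ : ∃ sN : Nat, s = (sN : Int) := ⟨s.toNat, by omega⟩
        obtain ⟨mN, hmN⟩ : ∃ mN : Nat, m = (mN : Int) := ⟨m.toNat, by omega⟩
        subst hsN hmN
        have hsN1 : 1 ≤ sN := by exact_mod_cast hs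
        have hmN2 : 2 ≤ mN := by exact_mod_cast hm
        have hsm : sN * mN ≤ tokens.length := by exact_mod_cast hg
        have hrec : PySem.List.slice tokens (some (-(sN:Int))) none
            = tokens.drop (tokens.length - sN) := PySem.List.slice_from_neg_natCast tokens sN (by omega)
        have e2 : (-((sN:Int) * (mN:Int)) : Int) = -((sN * mN : Nat) : Int) := by push_cast; ring
        have htail : PySem.List.slice tokens (some (-((sN:Int) * (mN:Int)))) none
            = tokens.drop (tokens.length - sN * mN) := by
          rw [e2, PySem.List.slice_from_neg_natCast tokens (sN * mN) (by positivity)]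
        simp only [hrec, htail, Int.toNat_natCast]
        rw [and_iff_right_of_imp (pv_len_of_eq _ _ _)]
        have hchunk : ∀ x : Int, 1 ≤ x → x < (mN : Int) →
            PySem.List.slice tokens (some (-(x + 1) * (sN:Int))) (some (-x * (sN:Int)))
              = (tokens.drop (tokens.length - (x.toNat + 1) * sN)).take sN := by
          intro x hx1 hx2
          lift x to Nat using (by omega)
          rw [Int.toNat_natCast]
          have c1 : (-((x:Int) + 1) * (sN:Int) : Int) = -(((x+1) * sN : Nat) : Int) := by push_cast; ring
          have c2 : (-(x:Int) * (sN:Int) : Int) = -((x * sN : Nat) : Int) := by push_cast; ring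
          have hx2' : x < mN := by exact_mod_cast hx2
          have hxle : (x + 1) * sN ≤ tokens.length := by
            have : (x + 1) * sN ≤ mN * sN := Nat.mul_le_mul_right sN (by omega)
            have : mN * sN = sN * mN := Nat.mul_comm mN sN
            omega
          have hmul : (x + 1) * sN = x * sN + sN := by ring
          have hx1' : 1 ≤ x := by exact_mod_cast hx1
          simp only [c1, c2, PySem.List.slice,
            PySem.List.clampIdx_neg_natCast tokens.length ((x+1)*sN) (Nat.mul_pos (by omega) (by omega)),
            PySem.List.clampIdx_neg_natCast tokens.length (x*sN) (Nat.mul_pos (by omega) (by omega))]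
          congr 1
          omega
        have hiff := pv_chunks_iff tokens (tokens.drop (tokens.length - sN)) sN hsN1 rfl mN (by omega)
          (by rw [Nat.mul_comm]; omega)
        rw [Nat.mul_comm mN sN] at hiff
        rw [← hiff]
        constructor
        · intro h j hj1 hj2
          have hx := h (j : Int) ⟨by exact_mod_cast hj1, by exact_mod_cast hj2⟩
          rw [if_pos (by exact_mod_cast hj1 : (0:Int) < (j:Int)),
            hchunk (j : Int) (by exact_mod_cast hj1) (by exact_mod_cast hj2)] at hx
          rw [Int.toNat_natCast] at hx
          exact hx
        · intro h x hx
          rw [if_pos (by omega : (0:Int) < x), hchunk x hx.1 hx.2]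
          exact h x.toNat (by omega) (by omega)

-- ===== VERDICT (by name: the statement is the Claim_ definition above) =====
theorem detect_token_loop_py_spec : Claim_equal_detect_token_loop_py := by
  intro tokens s m _
  exact pv_main tokens s m
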